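-- pv_equiv track=rewrite | github.com/anipriyo/QKD_with_Privacy_Amplification | key_processing.py | recover_key_with_seed
-- ===== SOURCE A (Python) =====
-- def recover_key_with_seed(compressed_key, seed_bit, bits_per_block=3):
--     if not compressed_key:
--         return []
--
--     recovered_key = [seed_bit]
--     blocks_count = len(compressed_key) // 2
--
--     for i in range(blocks_count):
--
--         x_xor_y = compressed_key[i*2]
--         y_xor_z = compressed_key[i*2+1]
--
--
--         y = recovered_key[-1] ^ x_xor_y
--         recovered_key.append(y)
--
--
--         z = y ^ y_xor_z
--         recovered_key.append(z)
--
--     return recovered_key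
-- ===== SOURCE B (Python) =====
-- def recover_key_with_seed(compressed_key, seed_bit, bits_per_block=3):
--     if not compressed_key:
--         return []
--     trunc = compressed_key[:len(compressed_key) // 2 * 2]
--     acc = seed_bit
--     for c in trunc:
--         acc ^= c
--     out = [acc]
--     for c in reversed(trunc):
--         acc ^= c
--         out.append(acc)
--     out.reverse()
--     return out
-- ===== Notes on version B (the rewrite author's own statement) =====
-- stated objective: alternative
-- what changed: Instead of A's forward pairwise scan (two appends per block reading recovered_key[-1]), B first folds the whole even-length prefix into one total XOR and then reconstructs the key BACK-TO-FRONT, XOR-cancelling each element off the total in a reversed traversal and reversing the collected list at the end; correctness rests on XOR being its own inverse, which A's forward scan never uses.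
import Mathlib
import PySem

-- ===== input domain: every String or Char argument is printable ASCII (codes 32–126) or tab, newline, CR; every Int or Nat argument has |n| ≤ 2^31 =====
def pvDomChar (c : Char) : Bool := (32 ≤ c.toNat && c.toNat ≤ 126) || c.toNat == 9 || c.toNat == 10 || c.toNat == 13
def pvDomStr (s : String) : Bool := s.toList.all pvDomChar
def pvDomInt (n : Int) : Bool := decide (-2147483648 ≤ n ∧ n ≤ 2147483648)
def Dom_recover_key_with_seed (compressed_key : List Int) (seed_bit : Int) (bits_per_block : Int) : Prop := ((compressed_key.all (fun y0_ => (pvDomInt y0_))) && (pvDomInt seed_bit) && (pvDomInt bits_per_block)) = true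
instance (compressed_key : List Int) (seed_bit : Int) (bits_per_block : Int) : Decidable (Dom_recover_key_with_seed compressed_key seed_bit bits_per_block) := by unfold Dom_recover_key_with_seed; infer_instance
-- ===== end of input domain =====

-- B replaces A's forward pairwise scan by a back-to-front reconstruction: one fold computes the
-- total XOR of the even-length prefix, then a reversed traversal XOR-cancels each element off it
-- and the collected list is reversed at the end (objective: alternative; relies on XOR involution).

-- ===== PORT A =====
def recover_key_with_seed (compressed_key : List Int) (seed_bit : Int) (bits_per_block : Int) : List Int :=
  if compressed_key = [] then []
  else
    let blocks_count : Nat := compressed_key.length / 2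
    (PySem.List.pyRange 0 (blocks_count : Int) 1).foldl (fun recovered_key i =>
      let x_xor_y := PySem.List.pyGetD compressed_key (i * 2) 0      -- in range: i < len//2
      let y_xor_z := PySem.List.pyGetD compressed_key (i * 2 + 1) 0  -- in range: i < len//2
      let y := PySem.Int.bxor (PySem.List.pyGetD recovered_key (-1) 0) x_xor_y  -- recovered_key nonempty
      let z := PySem.Int.bxor y y_xor_z
      recovered_key ++ [y] ++ [z]) [seed_bit]

-- ===== PORT B =====
def recover_key_with_seed_alt (compressed_key : List Int) (seed_bit : Int) (bits_per_block : Int) : List Int :=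
  if compressed_key = [] then []
  else
    let trunc := PySem.List.slice compressed_key none
      (some ((compressed_key.length / 2 * 2 : Nat) : Int))
    let total := trunc.foldl (fun acc c => PySem.Int.bxor acc c) seed_bit
    let st := trunc.reverse.foldl (fun (st : List Int × Int) c =>
        let acc := PySem.Int.bxor st.2 c
        (st.1 ++ [acc], acc)) ([total], total)
    st.1.reverse

-- ===== PRECONDITION & SPEC =====
def Spec_recover_key_with_seed (compressed_key : List Int) (seed_bit : Int) (bits_per_block : Int) (out : List Int) : Prop := out = recover_key_with_seed_alt compressed_key seed_bit bits_per_block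
instance (compressed_key : List Int) (seed_bit : Int) (bits_per_block : Int) (out : List Int) : Decidable (Spec_recover_key_with_seed compressed_key seed_bit bits_per_block out) := by unfold Spec_recover_key_with_seed; infer_instance

-- ===== CLAIM (what is proved, stated in full; the proofs are below) =====
def Claim_equal_recover_key_with_seed : Prop := ∀ (compressed_key : List Int) (seed_bit : Int) (bits_per_block : Int), Dom_recover_key_with_seed compressed_key seed_bit bits_per_block → Spec_recover_key_with_seed compressed_key seed_bit bits_per_block (recover_key_with_seed compressed_key seed_bit bits_per_block)

-- ===== LEMMAS AND PROOFS =====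

-- prefix-XOR value: XOR of seed with the first k compressed values
def pvPfx (ck : List Int) (s : Int) (k : Nat) : Int :=
  (ck.take k).foldl (fun v c => PySem.Int.bxor v c) s

-- A's loop body, with compressed_key fixed
def pvStepA (ck : List Int) (recovered_key : List Int) (i : Int) : List Int :=
  let x_xor_y := PySem.List.pyGetD ck (i * 2) 0
  let y_xor_z := PySem.List.pyGetD ck (i * 2 + 1) 0
  let y := PySem.Int.bxor (PySem.List.pyGetD recovered_key (-1) 0) x_xor_y
  let z := PySem.Int.bxor y y_xor_z
  recovered_key ++ [y] ++ [z]

-- B's reverse-loop body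
def pvStepB (st : List Int × Int) (c : Int) : List Int × Int :=
  let acc := PySem.Int.bxor st.2 c
  (st.1 ++ [acc], acc)

lemma pvBxorCancel (a b : Int) : PySem.Int.bxor (PySem.Int.bxor a b) b = a := by
  unfold PySem.Int.bxor
  by_cases ha : 0 ≤ a <;> by_cases hb : 0 ≤ b <;>
    simp only [ha, hb, if_false, if_pos]
  · rw [if_pos (by positivity)]
    simp [Int.toNat_of_nonneg ha]
  · rw [if_neg (by have := Int.natCast_nonneg (a.toNat ^^^ (-b - 1).toNat); omega)]
    have e : (-(-(↑(a.toNat ^^^ (-b - 1).toNat) : Int) - 1) - 1)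
        = ↑(a.toNat ^^^ (-b - 1).toNat) := by ring
    rw [e]
    simp [Int.toNat_of_nonneg ha]
  · rw [if_neg (by have := Int.natCast_nonneg ((-a - 1).toNat ^^^ b.toNat); omega)]
    have e : (-(-(↑((-a - 1).toNat ^^^ b.toNat) : Int) - 1) - 1)
        = ↑((-a - 1).toNat ^^^ b.toNat) := by ring
    rw [e]
    simp
    omega
  · rw [if_pos (by positivity)]
    simp
    omega

lemma pvPfx_succ (ck : List Int) (s : Int) (k : Nat) (hk : k < ck.length) :
    pvPfx ck s (k + 1) = PySem.Int.bxor (pvPfx ck s k) ck[k] := by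
  unfold pvPfx
  rw [List.take_add_one, List.getElem?_eq_getElem hk, Option.toList_some, List.foldl_append,
    List.foldl_cons, List.foldl_nil]

lemma pvMain (ck : List Int) (s : Int) : ∀ (n : Nat), 2 * n ≤ ck.length →
    (PySem.List.pyRange 0 (n : Int) 1).foldl (pvStepA ck) [s]
      = (List.range (2 * n + 1)).map (pvPfx ck s) := by
  intro n
  induction n with
  | zero => intro _; simp [PySem.List.pyRange, pvPfx]
  | succ n ih =>
      intro h
      have hn : 2 * n ≤ ck.length := by omega
      have h1 : 2 * n < ck.length := by omega
      have h2 : 2 * n + 1 < ck.length := by omega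
      have hrange : PySem.List.pyRange 0 ((n + 1 : Nat) : Int) 1
          = PySem.List.pyRange 0 (n : Int) 1 ++ [(n : Int)] := by
        push_cast
        exact PySem.List.pyRange_one_succ_right (by positivity)
      have hR : List.range (2 * (n + 1) + 1)
          = List.range (2 * n + 1) ++ [2 * n + 1] ++ [2 * n + 2] := by
        have e : 2 * (n + 1) + 1 = (2 * n + 1 + 1) + 1 := by omega
        rw [e, List.range_succ, List.range_succ]
      rw [hrange, hR]
      simp only [List.foldl_append, List.foldl_cons, List.foldl_nil, ih hn, List.map_append]
      rw [List.range_succ, List.map_append]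
      have hx : PySem.List.pyGetD ck ((n : Int) * 2) 0 = ck[2 * n] := by
        have e : (n : Int) * 2 = ((2 * n : Nat) : Int) := by push_cast; ring
        rw [e]
        exact PySem.List.pyGetD_ofNat ck (2 * n) 0 h1
      have hy : PySem.List.pyGetD ck ((n : Int) * 2 + 1) 0 = ck[2 * n + 1] := by
        have e : (n : Int) * 2 + 1 = ((2 * n + 1 : Nat) : Int) := by push_cast; ring
        rw [e]
        exact PySem.List.pyGetD_ofNat ck (2 * n + 1) 0 h2
      simp only [pvStepA, hx, hy, List.map_cons, List.map_nil,
        PySem.List.pyGetD_neg_one_append_singleton]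
      rw [← pvPfx_succ ck s (2 * n) h1]
      have e2 : 2 * n + 1 + 1 = 2 * n + 2 := by omega
      rw [← e2, ← pvPfx_succ ck s (2 * n + 1) h2]

-- B's reverse loop, over the reversed first n elements, prepends pvPfx (n-1), …, pvPfx 0
lemma pvRev (ck : List Int) (s : Int) : ∀ (n : Nat), n ≤ ck.length → ∀ (l : List Int),
    (ck.take n).reverse.foldl pvStepB (l, pvPfx ck s n)
      = (l ++ (List.range n).map (fun k => pvPfx ck s (n - 1 - k)), pvPfx ck s 0) := by
  intro n
  induction n with
  | zero => intro _ l; simp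
  | succ n ih =>
      intro h l
      have hn : n < ck.length := by omega
      rw [List.take_add_one, List.getElem?_eq_getElem hn, Option.toList_some,
        List.reverse_append, List.reverse_singleton, List.singleton_append, List.foldl_cons]
      have hstep : pvStepB (l, pvPfx ck s (n + 1)) ck[n] = (l ++ [pvPfx ck s n], pvPfx ck s n) := by
        simp only [pvStepB]
        rw [pvPfx_succ ck s n hn, pvBxorCancel]
      rw [hstep, ih (by omega) (l ++ [pvPfx ck s n])]
      have hin : (List.range (n + 1)).map (fun k => pvPfx ck s (n + 1 - 1 - k))
          = pvPfx ck s n :: (List.range n).map (fun k => pvPfx ck s (n - 1 - k)) := by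
        rw [List.range_succ_eq_map, List.map_cons, List.map_map]
        congr 1
        apply List.map_congr_left
        intro k hk
        simp only [Function.comp_apply]
        congr 1
        omega
      rw [hin, List.append_assoc, List.singleton_append]

-- reversing the list of pvPfx (n-1-k) values gives the list of pvPfx k values
lemma pvRevMap (n : Nat) (f : Nat → Int) :
    ((List.range n).map (fun k => f (n - 1 - k))).reverse = (List.range n).map f := by
  induction n with
  | zero => simp
  | succ n ih =>
      conv_lhs => rw [List.range_succ_eq_map]
      conv_rhs => rw [List.range_succ]
      rw [List.map_cons, List.map_map, List.reverse_cons, List.map_append]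
      congr 1
      rw [← ih]
      congr 1
      apply List.map_congr_left
      intro k hk
      simp only [Function.comp_apply]
      congr 1
      omega

lemma pvPortA (ck : List Int) (s b : Int) (h : ck ≠ []) :
    recover_key_with_seed ck s b
      = (List.range (2 * (ck.length / 2) + 1)).map (pvPfx ck s) := by
  simp only [recover_key_with_seed, if_neg h]
  exact pvMain ck s (ck.length / 2) (by omega)

lemma pvPortB (ck : List Int) (s b : Int) (h : ck ≠ []) :
    recover_key_with_seed_alt ck s b
      = (List.range (2 * (ck.length / 2) + 1)).map (pvPfx ck s) := by
  simp only [recover_key_with_seed_alt, if_neg h]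
  rw [PySem.List.slice_to_natCast]
  have hn : ck.length / 2 * 2 ≤ ck.length := by omega
  have htot : (ck.take (ck.length / 2 * 2)).foldl (fun acc c => PySem.Int.bxor acc c) s
      = pvPfx ck s (ck.length / 2 * 2) := rfl
  rw [htot,
    show (fun (st : List Int × Int) c =>
        (st.1 ++ [PySem.Int.bxor st.2 c], PySem.Int.bxor st.2 c)) = pvStepB from rfl,
    pvRev ck s (ck.length / 2 * 2) hn [pvPfx ck s (ck.length / 2 * 2)]]
  rw [List.singleton_append, List.reverse_cons, pvRevMap]
  have e : 2 * (ck.length / 2) + 1 = ck.length / 2 * 2 + 1 := by omega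
  rw [e, List.range_succ, List.map_append, List.map_singleton]

-- ===== VERDICT (by name: the statement is the Claim_ definition above) =====
theorem recover_key_with_seed_spec : Claim_equal_recover_key_with_seed := by
  intro ck s b _
  unfold Spec_recover_key_with_seed
  by_cases h : ck = []
  · simp [recover_key_with_seed, recover_key_with_seed_alt, h]
  · rw [pvPortA ck s b h, pvPortB ck s b h]
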